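-- pv_equiv track=rewrite | github.com/SaswataBhattacharyya/local_coder_agent | agent/info_pipeline.py | _summarize_readme
-- ===== SOURCE A (Python) =====
-- from typing import List, Tuple
--
-- def _summarize_readme(text: str) -> str:
--     lines = [ln.strip() for ln in text.splitlines()]
--     while lines and not lines[0]:
--         lines.pop(0)
--     if not lines:
--         return "No README content found."
--     # Prefer first heading + first paragraph
--     heading = ""
--     if lines[0].startswith("#"):
--         heading = lines[0].lstrip("#").strip()
--         lines = lines[1:]
--     para: List[str] = []
--     for ln in lines:
--         if not ln:
--             if para:
--                 break
--             continue
--         if ln.startswith("#"):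
--             break
--         para.append(ln)
--         if len(para) >= 4:
--             break
--     summary = " ".join(para).strip()
--     if heading and summary:
--         return f"{heading}: {summary}"
--     if heading:
--         return heading
--     if summary:
--         return summary
--     return "README exists but no summary paragraph was detected."
-- ===== SOURCE B (Python) =====
-- def _drop_blank(lines):
--     i = 0
--     while i < len(lines) and not lines[i]:
--         i += 1
--     return lines[i:]
--
-- def _take_para(lines, k):
--     if k == 0 or not lines or not lines[0] or lines[0].startswith("#"):
--         return []
--     return [lines[0]] + _take_para(lines[1:], k - 1)
--
-- def _summarize_readme(text: str) -> str:
--     lines = _drop_blank([ln.strip() for ln in text.splitlines()])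
--     if not lines:
--         return "No README content found."
--     heading = ""
--     if lines[0].startswith("#"):
--         heading = lines[0].lstrip("#").strip()
--         lines = lines[1:]
--     summary = " ".join(_take_para(_drop_blank(lines), 4)).strip()
--     parts = [p for p in (heading, summary) if p]
--     return ": ".join(parts) if parts else "README exists but no summary paragraph was detected."
-- ===== Notes on version B (the rewrite author's own statement) =====
-- stated objective: alternative
-- what changed: Replaces A's in-place pop loop and flag-driven paragraph accumulator (continue-on-blank / break-on-blank-after-content / break-at-4) with two small helpers skip leading blanks by index, then take at most 4 lines up to a blank or heading line and replaces the four-branch return with joining the nonempty parts of (heading, summary) with a colon-space separator.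
import Mathlib
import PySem

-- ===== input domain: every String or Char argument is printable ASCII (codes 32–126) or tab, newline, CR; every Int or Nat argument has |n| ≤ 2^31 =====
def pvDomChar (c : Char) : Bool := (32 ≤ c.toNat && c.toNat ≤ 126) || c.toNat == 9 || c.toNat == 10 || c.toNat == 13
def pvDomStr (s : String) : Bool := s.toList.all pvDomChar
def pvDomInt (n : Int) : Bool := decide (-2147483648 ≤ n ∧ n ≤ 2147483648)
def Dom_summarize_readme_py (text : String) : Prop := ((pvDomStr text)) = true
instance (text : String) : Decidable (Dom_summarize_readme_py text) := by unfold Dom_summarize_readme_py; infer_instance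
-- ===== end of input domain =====

-- B replaces A's mutable flag-driven loops by skip-blanks / take-at-most-4 helpers and joins the nonempty parts with ": " instead of a four-branch return (alternative decomposition, same cost).

-- ===== PORT A =====
-- A's 'while lines and not lines[0]: lines.pop(0)'
def pvDropBlanks : List (List Char) → List (List Char)
  | [] => []
  | l :: ls => if l.isEmpty then pvDropBlanks ls else l :: ls

-- A's paragraph loop, carrying para; branches in A's order
def pvAPara : List (List Char) → List (List Char) → List (List Char)
  | [], para => para
  | ln :: rest, para =>
    if ln.isEmpty then
      if para.isEmpty then pvAPara rest para else para
    else if PySem.Chars.startswith ln ['#'] then para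
    else
      let para' := para ++ [ln]
      if 4 ≤ para'.length then para' else pvAPara rest para'

def summarize_readme_py (text : String) : String :=
  let lines := (PySem.Chars.splitlines text.toList).map PySem.Chars.strip
  match pvDropBlanks lines with
  | [] => "No README content found."
  | l0 :: rest =>
    -- lstrip("#") with the single char '#' is exactly dropWhile (· == '#')
    let hb :=
      if PySem.Chars.startswith l0 ['#'] then
        (PySem.Chars.strip (l0.dropWhile (· == '#')), rest)
      else (([] : List Char), l0 :: rest)
    let heading := hb.1
    let para := pvAPara hb.2 []
    let summary := PySem.Chars.strip (PySem.Chars.join [' '] para)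
    if !heading.isEmpty && !summary.isEmpty then String.ofList (heading ++ [':', ' '] ++ summary)
    else if !heading.isEmpty then String.ofList heading
    else if !summary.isEmpty then String.ofList summary
    else "README exists but no summary paragraph was detected."

-- ===== PORT B =====
-- Source B's _drop_blank: count the leading blank lines (the index loop), then slice
def pvBDropCount : List (List Char) → Nat
  | [] => 0
  | l :: ls => if l = [] then pvBDropCount ls + 1 else 0

def pvBDrop (lines : List (List Char)) : List (List Char) :=
  lines.drop (pvBDropCount lines)

-- Source B's _take_para: at most k lines, stopping at a blank or '#' line
def pvTakePara : List (List Char) → Nat → List (List Char)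
  | _, 0 => []
  | [], _ + 1 => []
  | l :: ls, k + 1 =>
    if l = [] || PySem.Chars.startswith l ['#'] then []
    else l :: pvTakePara ls k

def summarize_readme_py_alt (text : String) : String :=
  match pvBDrop ((PySem.Chars.splitlines text.toList).map PySem.Chars.strip) with
  | [] => "No README content found."
  | l0 :: rest =>
    let hd_body :=
      if PySem.Chars.startswith l0 ['#'] then
        (PySem.Chars.strip (l0.dropWhile (· == '#')), rest)
      else (([] : List Char), l0 :: rest)
    let summary := PySem.Chars.strip (PySem.Chars.join [' '] (pvTakePara (pvBDrop hd_body.2) 4))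
    let parts := List.filter (fun p => !p.isEmpty) [hd_body.1, summary]
    if parts.isEmpty then "README exists but no summary paragraph was detected."
    else String.ofList (PySem.Chars.join [':', ' '] parts)

-- ===== PRECONDITION & SPEC =====
def Spec_summarize_readme_py (text : String) (out : String) : Prop := out = summarize_readme_py_alt text
instance (text : String) (out : String) : Decidable (Spec_summarize_readme_py text out) := by unfold Spec_summarize_readme_py; infer_instance

-- ===== CLAIM =====
def Claim_equal_summarize_readme_py : Prop := ∀ (text : String), Dom_summarize_readme_py text → Spec_summarize_readme_py text (summarize_readme_py text)

-- ===== LEMMAS AND PROOFS =====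

lemma pvBDrop_eq (ls : List (List Char)) : pvBDrop ls = pvDropBlanks ls := by
  induction ls with
  | nil => rfl
  | cons l t ih =>
    by_cases h : l = []
    · subst h
      simp [pvBDrop, pvBDropCount, pvDropBlanks] at ih ⊢
      exact ih
    · simp [pvBDrop, pvBDropCount, pvDropBlanks, h, List.isEmpty_iff]

lemma pvTakePara_eq (ls : List (List Char)) : ∀ k, pvTakePara ls k =
    (ls.takeWhile (fun l => !l.isEmpty && !PySem.Chars.startswith l ['#'])).take k := by
  induction ls with
  | nil => intro k; cases k <;> simp [pvTakePara]
  | cons l t ih =>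
    intro k
    cases k with
    | zero => simp [pvTakePara]
    | succ k =>
      rw [List.takeWhile_cons]
      simp only [pvTakePara]
      by_cases h : (l = [] || PySem.Chars.startswith l ['#']) = true
      · rw [if_pos h]
        have hf : (!l.isEmpty && !PySem.Chars.startswith l ['#']) = false := by
          simp only [Bool.or_eq_true, decide_eq_true_eq] at h
          rcases h with h | h <;> simp [h]
        rw [hf]
        simp
      · rw [if_neg h]
        have ht : (!l.isEmpty && !PySem.Chars.startswith l ['#']) = true := by
          simp only [Bool.or_eq_true, decide_eq_true_eq, not_or] at h
          simp [h.1, h.2]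
        rw [ht]
        simp [ih]

-- A's loop once a line has been collected
lemma pvAPara_collect (ls : List (List Char)) : ∀ (para : List (List Char)),
    para ≠ [] → para.length < 4 →
    pvAPara ls para =
      para ++ (ls.takeWhile (fun l => !l.isEmpty && !PySem.Chars.startswith l ['#'])).take (4 - para.length) := by
  induction ls with
  | nil => intro para h1 h2; simp [pvAPara]
  | cons ln rest ih =>
    intro para h1 h2
    by_cases he : ln.isEmpty = true
    · simp only [pvAPara]
      rw [if_pos he, if_neg (by simp [h1]), List.takeWhile_cons_of_neg (by simp [he])]
      simp
    · by_cases hsw : PySem.Chars.startswith ln ['#'] = true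
      · simp only [pvAPara]
        rw [if_neg he, if_pos hsw, List.takeWhile_cons_of_neg (by simp [hsw])]
        simp
      · simp only [pvAPara]
        rw [if_neg he, if_neg hsw,
          List.takeWhile_cons_of_pos (p := fun l => !l.isEmpty && !PySem.Chars.startswith l ['#']) (a := ln) (l := rest) (by simp [he, hsw])]
        have hlen : (para ++ [ln]).length = para.length + 1 := by simp
        by_cases h4 : 4 ≤ (para ++ [ln]).length
        · rw [if_pos h4]
          have h3 : 4 - para.length = 1 := by omega
          rw [h3]; simp
        · rw [if_neg h4, ih (para ++ [ln]) (by simp) (by omega)]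
          have h3 : 4 - para.length = (4 - (para ++ [ln]).length) + 1 := by omega
          rw [h3, List.take_succ_cons]
          simp

-- the bridge: A's paragraph loop equals B's skip-blanks-then-take-4 phase
lemma pvPara_eq (ls : List (List Char)) :
    pvAPara ls [] = pvTakePara (pvBDrop ls) 4 := by
  rw [pvBDrop_eq]
  induction ls with
  | nil => simp [pvAPara, pvDropBlanks, pvTakePara]
  | cons ln rest ih =>
    by_cases he : ln.isEmpty = true
    · have hln : ln = [] := by simpa [List.isEmpty_iff] using he
      subst hln
      rw [show pvAPara ([] :: rest) [] = pvAPara rest [] from rfl]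
      simpa [pvDropBlanks] using ih
    · have hd : pvDropBlanks (ln :: rest) = ln :: rest := by simp [pvDropBlanks, he]
      rw [hd]
      by_cases hsw : PySem.Chars.startswith ln ['#'] = true
      · have hln : ¬ ln = [] := by simpa [List.isEmpty_iff] using he
        simp only [pvAPara, pvTakePara]
        rw [if_neg he, if_pos hsw]
        simp [hln, hsw]
      · have hln : ¬ ln = [] := by simpa [List.isEmpty_iff] using he
        simp only [pvAPara, pvTakePara]
        rw [if_neg he, if_neg hsw,
          if_neg (show ¬ 4 ≤ (([] : List (List Char)) ++ [ln]).length by simp),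
          pvAPara_collect rest ([] ++ [ln]) (by simp) (by simp)]
        rw [if_neg (by simp [hln, hsw])]
        rw [pvTakePara_eq]
        simp

-- the two return decompositions agree
lemma pvFormat (h s : List Char) :
    (if !h.isEmpty && !s.isEmpty then String.ofList (h ++ [':', ' '] ++ s)
     else if !h.isEmpty then String.ofList h
     else if !s.isEmpty then String.ofList s
     else "README exists but no summary paragraph was detected.")
    =
    (if (List.filter (fun p => !p.isEmpty) [h, s]).isEmpty then
        "README exists but no summary paragraph was detected."
     else String.ofList (PySem.Chars.join [':', ' '] (List.filter (fun p => !p.isEmpty) [h, s]))) := by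
  by_cases hh : h.isEmpty = true <;> by_cases hs : s.isEmpty = true <;>
    simp [hh, hs, PySem.Chars.join_singleton, PySem.Chars.join_cons_cons,
      List.append_assoc]

-- ===== VERDICT =====
theorem summarize_readme_py_spec : Claim_equal_summarize_readme_py := by
  intro text _
  show summarize_readme_py text = summarize_readme_py_alt text
  simp only [summarize_readme_py, summarize_readme_py_alt, pvBDrop_eq]
  cases pvDropBlanks ((PySem.Chars.splitlines text.toList).map PySem.Chars.strip) with
  | nil => rfl
  | cons l0 rest =>
    dsimp only
    rw [pvPara_eq, pvBDrop_eq, pvFormat]
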